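-- pv_equiv track=rewrite | github.com/johnhlocke/AD-Epstein-Index | src/cross_reference.py | _best_bb_match_type
-- ===== SOURCE A (Python) =====
-- def _best_bb_match_type(match_types: list) -> str:
--     """Return the highest-confidence match type from a list."""
--     rank = {"last_first": 4, "full_name": 3, "last_name_only": 2}
--     best = ""
--     best_rank = 0
--     for mt in match_types:
--         r = rank.get(mt, 0)
--         if r > best_rank:
--             best_rank = r
--             best = mt
--     return best
-- ===== SOURCE B (Python) =====
-- def _best_bb_match_type(match_types: list) -> str:
--     """Return the highest-confidence match type from a list."""
--     for mt in ("last_first", "full_name", "last_name_only"):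
--         if mt in match_types:
--             return mt
--     return ""
-- ===== Notes on version B (the rewrite author's own statement) =====
-- stated objective: simpler
-- what changed: Instead of scanning the input tracking a running best rank, B iterates over the three known types in fixed descending priority and returns the first one present in the input (membership test), '' if none.
import Mathlib
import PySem

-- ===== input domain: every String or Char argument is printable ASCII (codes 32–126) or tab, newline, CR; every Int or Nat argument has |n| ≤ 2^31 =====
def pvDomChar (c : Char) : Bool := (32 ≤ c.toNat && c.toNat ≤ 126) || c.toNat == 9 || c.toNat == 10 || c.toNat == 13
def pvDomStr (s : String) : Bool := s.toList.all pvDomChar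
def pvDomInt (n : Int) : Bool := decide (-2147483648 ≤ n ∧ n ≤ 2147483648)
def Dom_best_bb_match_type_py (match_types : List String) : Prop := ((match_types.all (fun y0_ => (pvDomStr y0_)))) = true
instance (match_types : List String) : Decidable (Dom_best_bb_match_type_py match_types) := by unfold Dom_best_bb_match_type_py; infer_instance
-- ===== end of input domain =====

-- B replaces A's running-best scan of the input by a fixed-priority loop over the
-- three known types with a membership test (simpler decomposition; same result).


-- ===== PORT A =====
-- rank = {"last_first": 4, "full_name": 3, "last_name_only": 2}
def rankDictA : PySem.Dict String Int :=
  PySem.Dict.ofList [("last_first", 4), ("full_name", 3), ("last_name_only", 2)]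

-- the for-loop: state (best, best_rank), updated exactly as in A
def best_bb_match_type_py (match_types : List String) : String :=
  (match_types.foldl
    (fun (st : String × Int) mt =>
      let r := rankDictA.getD mt 0
      if r > st.2 then (mt, r) else st)
    ("", 0)).1

-- ===== PORT B =====
def best_bb_match_type_py_alt (match_types : List String) : String :=
  if "last_first" ∈ match_types then "last_first"
  else if "full_name" ∈ match_types then "full_name"
  else if "last_name_only" ∈ match_types then "last_name_only"
  else ""

-- ===== PRECONDITION & SPEC =====
def Spec_best_bb_match_type_py (match_types : List String) (out : String) : Prop := out = best_bb_match_type_py_alt match_types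
instance (match_types : List String) (out : String) : Decidable (Spec_best_bb_match_type_py match_types out) := by unfold Spec_best_bb_match_type_py; infer_instance

-- ===== CLAIM (what is proved, stated in full; the proofs are below) =====
def Claim_equal_best_bb_match_type_py : Prop := ∀ (match_types : List String), Dom_best_bb_match_type_py match_types → Spec_best_bb_match_type_py match_types (best_bb_match_type_py match_types)

-- ===== LEMMAS AND PROOFS =====

-- rank.get(mt, 0) evaluated on each kind of key
theorem rank_lf : rankDictA.getD "last_first" 0 = 4 := by decide
theorem rank_fn : rankDictA.getD "full_name" 0 = 3 := by decide
theorem rank_lno : rankDictA.getD "last_name_only" 0 = 2 := by decide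
theorem rank_other (mt : String) (h1 : mt ≠ "last_first") (h2 : mt ≠ "full_name")
    (h3 : mt ≠ "last_name_only") : rankDictA.getD mt 0 = 0 := by
  have h : rankDictA
      = PySem.Dict.mk [("last_first", 4), ("full_name", 3), ("last_name_only", 2)] := by
    decide
  rw [h, PySem.Dict.getD_eq_get?_getD]
  simp [beq_iff_eq, Ne.symm h1, Ne.symm h2, Ne.symm h3, PySem.Dict.get?]

-- Characterisation of A's fold from an arbitrary non-negative state.
theorem foldA_char (l : List String) (b : String) (r : Int) (hr : 0 ≤ r) :
    (l.foldl
      (fun (st : String × Int) mt =>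
        let r := rankDictA.getD mt 0
        if r > st.2 then (mt, r) else st)
      (b, r)).1 =
    (if "last_first" ∈ l ∧ r < 4 then "last_first"
     else if "full_name" ∈ l ∧ r < 3 then "full_name"
     else if "last_name_only" ∈ l ∧ r < 2 then "last_name_only"
     else b) := by
  induction l generalizing b r with
  | nil => simp
  | cons hd tl ih =>
    simp only [List.foldl_cons]
    by_cases h1 : hd = "last_first"
    · subst h1
      by_cases hlt : r < 4
      · rw [show (if (rankDictA.getD "last_first" 0) > r
              then ("last_first", rankDictA.getD "last_first" 0) else (b, r))
            = ("last_first", 4) by rw [rank_lf, if_pos (by omega)]]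
        rw [ih _ _ (by omega)]
        simp [hlt]
      · rw [show (if (rankDictA.getD "last_first" 0) > r
              then ("last_first", rankDictA.getD "last_first" 0) else (b, r))
            = (b, r) by rw [rank_lf, if_neg (by omega)]]
        rw [ih _ _ hr]
        have h3 : ¬ r < 3 := by omega
        have h2 : ¬ r < 2 := by omega
        simp [hlt, h3, h2]
    · by_cases h2 : hd = "full_name"
      · subst h2
        by_cases hlt : r < 3
        · rw [show (if (rankDictA.getD "full_name" 0) > r
                then ("full_name", rankDictA.getD "full_name" 0) else (b, r))
              = ("full_name", 3) by rw [rank_fn, if_pos (by omega)]]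
          rw [ih _ _ (by omega)]
          by_cases hlf : "last_first" ∈ tl <;> simp [hlf, hlt] <;> omega
        · rw [show (if (rankDictA.getD "full_name" 0) > r
                then ("full_name", rankDictA.getD "full_name" 0) else (b, r))
              = (b, r) by rw [rank_fn, if_neg (by omega)]]
          rw [ih _ _ hr]
          have h2' : ¬ r < 2 := by omega
          by_cases hlf : "last_first" ∈ tl <;> simp [hlf, hlt, h2'] <;> omega
      · by_cases h3 : hd = "last_name_only"
        · subst h3
          by_cases hlt : r < 2
          · rw [show (if (rankDictA.getD "last_name_only" 0) > r
                  then ("last_name_only", rankDictA.getD "last_name_only" 0) else (b, r))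
                = ("last_name_only", 2) by rw [rank_lno, if_pos (by omega)]]
            rw [ih _ _ (by omega)]
            by_cases hlf : "last_first" ∈ tl <;> by_cases hfn : "full_name" ∈ tl <;>
              simp [hlf, hfn, hlt] <;> omega
          · rw [show (if (rankDictA.getD "last_name_only" 0) > r
                  then ("last_name_only", rankDictA.getD "last_name_only" 0) else (b, r))
                = (b, r) by rw [rank_lno, if_neg (by omega)]]
            rw [ih _ _ hr]
            by_cases hlf : "last_first" ∈ tl <;> by_cases hfn : "full_name" ∈ tl <;>
              simp [hlf, hfn, hlt] <;> omega
        · -- unknown type: rank 0 never beats r ≥ 0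
          rw [show (if (rankDictA.getD hd 0) > r
                then (hd, rankDictA.getD hd 0) else (b, r))
              = (b, r) by rw [rank_other hd h1 h2 h3, if_neg (by omega)]]
          rw [ih _ _ hr]
          simp [h1, h2, h3, List.mem_cons, Ne.symm]

-- ===== VERDICT (by name: the statement is the Claim_ definition above) =====
theorem best_bb_match_type_py_spec : Claim_equal_best_bb_match_type_py := by
  intro l _
  show best_bb_match_type_py l = best_bb_match_type_py_alt l
  unfold best_bb_match_type_py best_bb_match_type_py_alt
  rw [foldA_char l "" 0 le_rfl]
  norm_num
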